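-- pv_equiv track=rewrite | github.com/sarenixx/boardbaby | scripts/pdf_to_deck_json.py | clean_page_lines
-- ===== SOURCE A (Python) =====
-- def clean_page_lines(lines: list[str], page_number: int, repeated: set[str]) -> list[str]:
--     cleaned: list[str] = []
--     for line in lines:
--         if line in repeated:
--             continue
--         if line.isdigit() and int(line) == page_number:
--             continue
--         if cleaned and cleaned[-1] == line:
--             continue
--         cleaned.append(line)
--     return cleaned
-- ===== SOURCE B (Python) =====
-- def clean_page_lines(lines: list[str], page_number: int, repeated: set[str]) -> list[str]:
--     def keep(line):
--         return line not in repeated and not (line.isdigit() and int(line) == page_number)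
--
--     def solve(seg):
--         if len(seg) <= 1:
--             return [l for l in seg if keep(l)]
--         mid = len(seg) // 2
--         left = solve(seg[:mid])
--         right = solve(seg[mid:])
--         if left and right and left[-1] == right[0]:
--             return left + right[1:]
--         return left + right
--
--     return solve(lines)
-- ===== Notes on version B (the rewrite author's own statement) =====
-- stated objective: alternative
-- what changed: Replaces A's single left-to-right accumulator loop by a divide-and-conquer recursion: each half is cleaned independently and the halves are merged, dropping the right half's first line when it equals the left half's last kept line.
import Mathlib
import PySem

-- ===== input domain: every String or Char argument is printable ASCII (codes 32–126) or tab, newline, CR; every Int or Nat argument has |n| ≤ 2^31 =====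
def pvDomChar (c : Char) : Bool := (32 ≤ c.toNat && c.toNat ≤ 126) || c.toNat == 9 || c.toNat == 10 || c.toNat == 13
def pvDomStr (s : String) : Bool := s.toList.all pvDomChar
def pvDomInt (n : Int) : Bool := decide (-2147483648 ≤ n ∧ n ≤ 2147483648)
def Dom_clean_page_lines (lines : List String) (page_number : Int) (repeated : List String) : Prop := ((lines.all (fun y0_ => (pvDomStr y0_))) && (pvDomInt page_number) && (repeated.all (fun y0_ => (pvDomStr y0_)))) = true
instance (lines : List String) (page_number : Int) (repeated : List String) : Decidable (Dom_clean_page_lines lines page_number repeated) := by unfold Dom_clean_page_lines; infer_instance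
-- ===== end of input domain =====

-- B replaces A's single left-to-right accumulator loop by a divide-and-conquer recursion:
-- each half is cleaned independently and the halves are merged at the boundary (objective: alternative, not faster).

-- ===== PORT A =====
-- literal port of A: one loop, accumulator `cleaned`, three guarded `continue`s
def clean_page_lines (lines : List String) (page_number : Int) (repeated : List String) : List String :=
  lines.foldl (fun cleaned line =>
    if repeated.contains line then cleaned
    else if PySem.Str.strIsdigit line && (PySem.Int.ofStr? line == some page_number) then cleaned
    else if !cleaned.isEmpty && (cleaned.getLast? == some line) then cleaned
    else cleaned ++ [line]) []

-- ===== PORT B =====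
-- Source B's `keep` predicate
def pvKeep (page_number : Int) (repeated : List String) (line : String) : Bool :=
  !repeated.contains line && !(PySem.Str.strIsdigit line && (PySem.Int.ofStr? line == some page_number))

-- Source B's `solve`: divide and conquer over the segment
def pvSolve (page_number : Int) (repeated : List String) (seg : List String) : List String :=
  if h : seg.length ≤ 1 then seg.filter (pvKeep page_number repeated)
  else
    let mid := seg.length / 2
    let left := pvSolve page_number repeated (seg.take mid)
    let right := pvSolve page_number repeated (seg.drop mid)
    if !left.isEmpty && !right.isEmpty && (left.getLast? == right.head?) then left ++ right.tail
    else left ++ right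
termination_by seg.length
decreasing_by
  · simp [List.length_take]; omega
  · simp [List.length_drop]; omega

def clean_page_lines_alt (lines : List String) (page_number : Int) (repeated : List String) : List String :=
  pvSolve page_number repeated lines

-- ===== PRECONDITION & SPEC =====
def Spec_clean_page_lines (lines : List String) (page_number : Int) (repeated : List String) (out : List String) : Prop := out = clean_page_lines_alt lines page_number repeated
instance (lines : List String) (page_number : Int) (repeated : List String) (out : List String) : Decidable (Spec_clean_page_lines lines page_number repeated out) := by unfold Spec_clean_page_lines; infer_instance

-- ===== CLAIM (what is proved, stated in full; the proofs are below) =====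
def Claim_equal_clean_page_lines : Prop := ∀ (lines : List String) (page_number : Int) (repeated : List String), Dom_clean_page_lines lines page_number repeated → Spec_clean_page_lines lines page_number repeated (clean_page_lines lines page_number repeated)

-- ===== LEMMAS AND PROOFS =====

-- proof-only reference function: collapse consecutive equal elements
def pvCollapse : List String → List String
  | [] => []
  | [x] => [x]
  | x :: y :: rest => if x == y then pvCollapse (y :: rest) else x :: pvCollapse (y :: rest)

-- proof-only helper: collapse with an explicit "previous kept element"
def pvGo : Option String → List String → List String
  | _, [] => []
  | prev, x :: rest => if prev == some x then pvGo prev rest else x :: pvGo (some x) rest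

-- proof-only helper: Source B's boundary merge, named
def pvJoin (a b : List String) : List String :=
  if !a.isEmpty && !b.isEmpty && (a.getLast? == b.head?) then a ++ b.tail else a ++ b

theorem pvGo_some_eq_collapse (xs : List String) : ∀ x, x :: pvGo (some x) xs = pvCollapse (x :: xs) := by
  induction xs with
  | nil => intro x; simp [pvGo, pvCollapse]
  | cons y rest ih =>
    intro x
    by_cases h : x = y
    · subst h
      simp [pvGo, pvCollapse, ih x]
    · simp [pvGo, pvCollapse, h, ih y]

theorem pvGo_none_eq_collapse (xs : List String) : pvGo none xs = pvCollapse xs := by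
  cases xs with
  | nil => rfl
  | cons x rest => simp [pvGo, pvGo_some_eq_collapse]

theorem pvCollapse_head? (x : String) (xs : List String) :
    (pvCollapse (x :: xs)).head? = some x := by
  induction xs generalizing x with
  | nil => simp [pvCollapse]
  | cons y rest ih =>
    by_cases h : x = y
    · subst h; simp [pvCollapse, ih]
    · simp [pvCollapse, h]

theorem pvCollapse_short (xs : List String) (h : xs.length ≤ 1) : pvCollapse xs = xs := by
  match xs, h with
  | [], _ => rfl
  | [x], _ => rfl

theorem pvJoin_cons (x : String) (a b : List String) (ha : a ≠ []) :
    pvJoin (x :: a) b = x :: pvJoin a b := by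
  obtain ⟨h, t, rfl⟩ := List.exists_cons_of_ne_nil ha
  cases b with
  | nil => simp [pvJoin]
  | cons y ys =>
    simp only [pvJoin, List.isEmpty_cons, List.getLast?_cons_cons, Bool.not_false, Bool.true_and,
      List.tail_cons, List.cons_append]
    split <;> rfl

theorem pvCollapse_cons (x : String) (xs : List String) :
    pvCollapse (x :: xs) = if xs.head? = some x then pvCollapse xs else x :: pvCollapse xs := by
  cases xs with
  | nil => simp [pvCollapse]
  | cons y ys =>
    by_cases h : y = x
    · subst h; simp [pvCollapse]
    · have h' : (x == y) = false := beq_eq_false_iff_ne.mpr (Ne.symm h)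
      simp [pvCollapse, h, h']

theorem pvCollapse_append (u v : List String) :
    pvCollapse (u ++ v) = pvJoin (pvCollapse u) (pvCollapse v) := by
  induction u with
  | nil => simp [pvCollapse, pvJoin]
  | cons x u' ih =>
    cases u' with
    | nil =>
      cases v with
      | nil => simp [pvCollapse, pvJoin]
      | cons y ys =>
        have hy := pvCollapse_head? y ys
        obtain ⟨t, ht⟩ : ∃ t, pvCollapse (y :: ys) = y :: t := by
          cases hcv : pvCollapse (y :: ys) with
          | nil => rw [hcv] at hy; simp at hy
          | cons z t => rw [hcv] at hy; simp at hy; exact ⟨t, by rw [hy]⟩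
        rw [List.singleton_append, pvCollapse_cons x (y :: ys), List.head?_cons]
        by_cases h : y = x
        · rw [if_pos (by rw [h]), ht]
          subst h
          simp [pvJoin, pvCollapse]
        · rw [if_neg (by simpa using h), ht]
          simp [pvJoin, pvCollapse, Ne.symm h]
    | cons w u'' =>
      have hne : pvCollapse (w :: u'') ≠ [] := by
        intro hc
        have := pvCollapse_head? w u''
        rw [hc] at this; simp at this
      simp only [List.cons_append]
      rw [pvCollapse_cons x (w :: (u'' ++ v)), pvCollapse_cons x (w :: u''),
        List.head?_cons, List.head?_cons]
      by_cases h : w = x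
      · rw [if_pos (by rw [h]), if_pos (by rw [h])]
        exact ih
      · rw [if_neg (by simpa using h), if_neg (by simpa using h)]
        rw [pvJoin_cons x _ _ hne]
        exact congrArg (List.cons x) ih

theorem pvSolve_eq_collapse (page_number : Int) (repeated : List String) (seg : List String) :
    pvSolve page_number repeated seg = pvCollapse (seg.filter (pvKeep page_number repeated)) := by
  fun_induction pvSolve with
  | case1 seg h =>
    have hlen : (seg.filter (pvKeep page_number repeated)).length ≤ 1 :=
      le_trans (List.length_filter_le _ _) h
    rw [pvCollapse_short _ hlen]
  | case2 seg h mid left right hcond ihl ihr =>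
    have hsplit : seg.filter (pvKeep page_number repeated)
        = (seg.take mid).filter (pvKeep page_number repeated)
          ++ (seg.drop mid).filter (pvKeep page_number repeated) := by
      rw [← List.filter_append, List.take_append_drop]
    rw [hsplit, pvCollapse_append, ← ihl, ← ihr]
    exact (if_pos hcond).symm
  | case3 seg h mid left right hcond ihl ihr =>
    have hsplit : seg.filter (pvKeep page_number repeated)
        = (seg.take mid).filter (pvKeep page_number repeated)
          ++ (seg.drop mid).filter (pvKeep page_number repeated) := by
      rw [← List.filter_append, List.take_append_drop]
    rw [hsplit, pvCollapse_append, ← ihl, ← ihr]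
    exact (if_neg (by simpa using hcond)).symm

theorem A_loop (page_number : Int) (repeated : List String) :
    ∀ (l : List String) (cleaned : List String),
      l.foldl (fun cleaned line =>
        if repeated.contains line then cleaned
        else if PySem.Str.strIsdigit line && (PySem.Int.ofStr? line == some page_number) then cleaned
        else if !cleaned.isEmpty && (cleaned.getLast? == some line) then cleaned
        else cleaned ++ [line]) cleaned
      = cleaned ++ pvGo cleaned.getLast? (l.filter (pvKeep page_number repeated)) := by
  intro l
  induction l with
  | nil => intro cleaned; simp [pvGo]
  | cons x rest ih =>
    intro cleaned
    by_cases hrep : repeated.contains x = true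
    · have hkf : pvKeep page_number repeated x = false := by
        simp only [pvKeep, hrep, Bool.not_true, Bool.false_and]
      simp only [List.foldl_cons, hrep, if_true]
      rw [ih]
      simp only [List.filter_cons, hkf, Bool.false_eq_true, if_false]
    · have hrep' : repeated.contains x = false := by simpa using hrep
      by_cases hdig : PySem.Chars.strIsdigit x.toList = true ∧ PySem.Int.ofStr? x = some page_number
      · have hd : (PySem.Str.strIsdigit x && (PySem.Int.ofStr? x == some page_number)) = true := by
          simp [PySem.Str.strIsdigit, hdig.1, hdig.2]
        simp only [List.foldl_cons, hrep', Bool.false_eq_true, if_false, hd, if_true]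
        rw [ih]
        have hk : pvKeep page_number repeated x = false := by
          simp [pvKeep, PySem.Str.strIsdigit, hdig.1, hdig.2]
        simp [hk]
      · have hdig' : (PySem.Str.strIsdigit x && (PySem.Int.ofStr? x == some page_number)) = false := by
          cases h1 : PySem.Chars.strIsdigit x.toList
          · simp [PySem.Str.strIsdigit, h1]
          · simp [PySem.Str.strIsdigit, h1]
            exact fun hc => hdig ⟨h1, hc⟩
        have hkeep : pvKeep page_number repeated x = true := by
          simp only [pvKeep, PySem.Str.strIsdigit] at hdig' ⊢
          simp only [hrep', hdig', Bool.not_false, Bool.and_self]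
        by_cases hlast : cleaned.getLast? = some x
        · have hne : cleaned.isEmpty = false := by
            cases cleaned <;> simp_all
          have hc : (!cleaned.isEmpty && (cleaned.getLast? == some x)) = true := by
            simp [hne, hlast]
          simp only [List.foldl_cons, hrep', Bool.false_eq_true, if_false, hdig', hc, if_true]
          rw [ih]
          simp [hkeep, pvGo, hlast]
        · have hc : (!cleaned.isEmpty && (cleaned.getLast? == some x)) = false := by
            simp [hlast]
          simp only [List.foldl_cons, hrep', Bool.false_eq_true, if_false, hdig', hc]
          rw [ih (cleaned ++ [x])]
          simp [hkeep, pvGo, hlast, List.getLast?_append]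

-- ===== VERDICT (by name: the statement is the Claim_ definition above) =====
theorem clean_page_lines_spec : Claim_equal_clean_page_lines := by
  intro lines page_number repeated _
  unfold Spec_clean_page_lines clean_page_lines clean_page_lines_alt
  rw [A_loop, pvSolve_eq_collapse]
  simp [pvGo_none_eq_collapse]
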